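-- pv_equiv track=rewrite | github.com/wentingzz/Program-Problem-Solving-MCS253 | substrings.py | searchParentString
-- ===== SOURCE A (Python) =====
-- def searchParentString(values, subString):
--     res, seenSelf = [], False
--     for v in values:
--         if v == subString:
--             if seenSelf:
--                 res.append(v)
--             else:
--                 seenSelf = True
--         elif v.find(subString) > -1:
--             res.append(v)
--     return res
-- ===== SOURCE B (Python) =====
-- def searchParentString(values, subString):
--     res = [v for v in values if v.find(subString) > -1]
--     if subString in values:
--         res.remove(subString)
--     return res
-- ===== Notes on version B (the rewrite author's own statement) =====
-- stated objective: simpler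
-- what changed: Replaces the interleaved loop with a seenSelf flag by two shaped passes: a comprehension builds the full filtered list, then a single list.remove drops the first exact match if present.
import Mathlib
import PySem

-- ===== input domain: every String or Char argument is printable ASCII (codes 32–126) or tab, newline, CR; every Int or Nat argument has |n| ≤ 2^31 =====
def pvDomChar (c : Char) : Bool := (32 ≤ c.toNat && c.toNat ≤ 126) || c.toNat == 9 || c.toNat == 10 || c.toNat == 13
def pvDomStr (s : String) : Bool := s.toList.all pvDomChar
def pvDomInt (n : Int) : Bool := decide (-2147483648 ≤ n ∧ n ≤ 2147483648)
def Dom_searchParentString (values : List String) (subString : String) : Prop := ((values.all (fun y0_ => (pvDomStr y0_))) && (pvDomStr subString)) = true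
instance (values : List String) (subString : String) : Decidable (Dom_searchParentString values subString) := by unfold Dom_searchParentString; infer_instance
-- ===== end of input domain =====

-- B replaces A's interleaved seenSelf-flag loop by two passes (filter, then remove the
-- first exact match); objective: simpler decomposition, same cost.


-- ===== PORT A =====
-- A's loop body: branch on v == subString, then on the seenSelf flag, else the find test
def pvStep (subString : String) (st : List String × Bool) (v : String) : List String × Bool :=
  if v == subString then
    if st.2 then (st.1 ++ [v], st.2) else (st.1, true)
  else if PySem.Str.find v subString > -1 then (st.1 ++ [v], st.2)
  else st

-- loop over values carrying (res, seenSelf), exactly as A does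
def searchParentString (values : List String) (subString : String) : List String :=
  (values.foldl (pvStep subString) ([], false)).1

-- ===== PORT B =====
-- comprehension (filter), then res.remove(subString) guarded by membership;
-- the 'none' arm of remove? is unreachable (subString ∈ values puts it in res)
def searchParentString_alt (values : List String) (subString : String) : List String :=
  let res := values.filter (fun v => PySem.Str.find v subString > -1)
  if subString ∈ values then
    match PySem.List.remove? res subString with
    | some r => r
    | none => res
  else res

-- ===== PRECONDITION & SPEC =====
def Spec_searchParentString (values : List String) (subString : String) (out : List String) : Prop := out = searchParentString_alt values subString
instance (values : List String) (subString : String) (out : List String) : Decidable (Spec_searchParentString values subString out) := by unfold Spec_searchParentString; infer_instance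

-- ===== CLAIM (what is proved, stated in full; the proofs are below) =====
def Claim_equal_searchParentString : Prop := ∀ (values : List String) (subString : String), Dom_searchParentString values subString → Spec_searchParentString values subString (searchParentString values subString)

-- ===== LEMMAS AND PROOFS =====

-- any string contains itself, so the filter predicate holds on subString itself
theorem pv_find_self (s : String) : (-1 : Int) < PySem.Chars.find s.toList s.toList := by
  have h : (0 : Int) ≤ PySem.Str.find s s := (PySem.Str.find_nonneg_iff s s).mpr List.infix_rfl
  rw [PySem.Str.find_eq] at h
  omega

-- once seenSelf is true, the loop just appends the filtered tail
theorem pv_loop_true (subString : String) (vs : List String) (res : List String) :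
    vs.foldl (pvStep subString) (res, true)
      = (res ++ vs.filter (fun v => PySem.Str.find v subString > -1), true) := by
  induction vs generalizing res with
  | nil => simp
  | cons v vs ih =>
    by_cases hv : v = subString
    · subst hv
      simp [pvStep, pv_find_self v, ih, List.append_assoc]
    · by_cases hf : (-1 : Int) < PySem.Chars.find v.toList subString.toList
      · simp [pvStep, hv, hf, ih, List.append_assoc]
      · simp [pvStep, hv, hf, ih]

-- while seenSelf is false, the result is the filtered tail with the first exact match erased
theorem pv_loop_false (subString : String) (vs : List String) (res : List String) :
    (vs.foldl (pvStep subString) (res, false)).1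
      = res ++ (if subString ∈ vs
          then (vs.filter (fun v => PySem.Str.find v subString > -1)).erase subString
          else vs.filter (fun v => PySem.Str.find v subString > -1)) := by
  induction vs generalizing res with
  | nil => simp
  | cons v vs ih =>
    by_cases hv : v = subString
    · subst hv
      simp [pvStep, pv_loop_true, pv_find_self v, List.erase_cons_head]
    · have hmem : subString ∈ v :: vs ↔ subString ∈ vs := by
        simp [List.mem_cons, (Ne.symm hv)]
      have hbeq : ¬ (v == subString) = true := by simp [hv]
      by_cases hf : (-1 : Int) < PySem.Chars.find v.toList subString.toList
      · by_cases hm : subString ∈ vs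
        · simp [pvStep, hv, hf, ih, hmem, hm,
            List.erase_cons_tail hbeq, List.append_assoc]
        · simp [pvStep, hv, hf, ih, hmem, hm, List.append_assoc]
      · simp [pvStep, hv, hf, ih, hmem]

-- ===== VERDICT (by name: the statement is the Claim_ definition above) =====
theorem searchParentString_spec : Claim_equal_searchParentString := by
  intro values subString _
  show searchParentString values subString = searchParentString_alt values subString
  have hA := pv_loop_false subString values []
  rw [searchParentString, hA, List.nil_append]
  unfold searchParentString_alt
  by_cases hm : subString ∈ values
  · have hmf : subString ∈ values.filter
        (fun v => decide ((-1 : Int) < PySem.Chars.find v.toList subString.toList)) :=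
      List.mem_filter.mpr ⟨hm, by simpa using pv_find_self subString⟩
    simp [hm, PySem.List.remove?_eq_some_erase _ _ hmf]
  · simp [hm]
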